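-- pv_equiv track=rewrite | github.com/ambercloud/aoc_2023 | day_11_part_2/main.py | calc_coords
-- ===== SOURCE A (Python) =====
-- from typing import List,TypeVar
--
-- def calc_coords(input: List[List[str]]) -> List[List[tuple[int, int]]]:
--     #rows offsets
--     ys = [0]
--     offset = 0
--     for row in input[:-1]:
--         offset = offset + 1 if '#' in row else offset + 1000000
--         ys.append(offset)
--     xs = [0]
--     offset = 0
--     for i in range(len(input[0]) - 1):
--         col = [x[i] for x in input]
--         offset = offset + 1 if '#' in col else offset + 1000000
--         xs.append(offset)
--     coords = [[(y,x) for x in xs] for y in ys]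
--     return coords
-- ===== SOURCE B (Python) =====
-- def calc_coords(input):
--     # One sweep over the grid collects the columns containing '#' (and per-row flags),
--     # so no per-column rebuild/scan is needed.
--     hash_cols = set()
--     hash_rows = []
--     for row in input:
--         has = False
--         for i, c in enumerate(row):
--             if c == '#':
--                 has = True
--                 hash_cols.add(i)
--         hash_rows.append(has)
--     ys = [0]
--     for has in hash_rows[:-1]:
--         ys.append(ys[-1] + (1 if has else 1000000))
--     xs = [0]
--     for i in range(len(input[0]) - 1):
--         xs.append(xs[-1] + (1 if i in hash_cols else 1000000))
--     return [[(y, x) for x in xs] for y in ys]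
-- ===== Notes on version B (the rewrite author's own statement) =====
-- stated objective: alternative
-- what changed: A rebuilds and scans each grid column separately; B makes a single sweep over the grid collecting the set of column indices containing '#' (and per-row flags), then derives both offset axes from those, with running offsets kept as the list's last element instead of a separate accumulator.
import Mathlib
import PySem

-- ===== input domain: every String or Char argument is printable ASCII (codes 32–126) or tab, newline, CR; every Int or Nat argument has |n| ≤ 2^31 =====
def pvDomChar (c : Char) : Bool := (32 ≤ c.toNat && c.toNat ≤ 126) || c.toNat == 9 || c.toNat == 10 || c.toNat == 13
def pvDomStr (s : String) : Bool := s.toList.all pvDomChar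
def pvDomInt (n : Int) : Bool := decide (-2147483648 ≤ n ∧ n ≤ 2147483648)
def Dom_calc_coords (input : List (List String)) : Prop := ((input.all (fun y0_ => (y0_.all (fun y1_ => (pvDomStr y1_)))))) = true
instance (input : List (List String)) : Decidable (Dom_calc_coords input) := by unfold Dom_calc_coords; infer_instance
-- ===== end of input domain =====

-- B replaces A's per-column rebuild-and-scan by one sweep of the grid collecting the
-- hash-bearing column indices into a set (objective: alternative decomposition, same cost).

-- ===== PORT A =====
-- literal transliteration of A: input[:-1] = dropLast; x[i] = pyGet? (none = IndexError,
-- excluded by Pre_); '#' in col is membership, which ignores the none entries.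
def calc_coords (input : List (List String)) : List (List (Int × Int)) :=
  let ysSt : List Int × Int := input.dropLast.foldl
    (fun st row =>
      let offset := if row.contains "#" then st.2 + 1 else st.2 + 1000000
      (st.1 ++ [offset], offset)) ([0], 0)
  let ys := ysSt.1
  let xsSt : List Int × Int :=
    (PySem.List.pyRange 0 (((input.headD []).length : Int) - 1) 1).foldl
    (fun st i =>
      let col := input.map (fun x => PySem.List.pyGet? x i)
      let offset := if col.contains (some "#") then st.2 + 1 else st.2 + 1000000
      (st.1 ++ [offset], offset)) ([0], 0)
  let xs := xsSt.1
  ys.map (fun y => xs.map (fun x => (y, x)))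

-- ===== PORT B =====
-- literal transliteration of B: one sweep filling (hash_cols, hash_rows), then the two
-- offset loops keyed on the recorded flags / set membership.
def calc_coords_alt (input : List (List String)) : List (List (Int × Int)) :=
  let sweep : PySem.Set Int × List Bool := input.foldl
    (fun st row =>
      let inner : PySem.Set Int × Bool := (PySem.List.enumerate row 0).foldl
        (fun p ic => if ic.2 = "#" then (PySem.Set.add p.1 ic.1, true) else p)
        (st.1, false)
      (inner.1, st.2 ++ [inner.2]))
    (PySem.Set.empty, [])
  let hashCols := sweep.1
  let hashRows := sweep.2
  let ys := hashRows.dropLast.foldl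
    (fun acc has => acc ++ [acc.getLastD 0 + (if has then 1 else 1000000)]) [0]
  let xs := (PySem.List.pyRange 0 (((input.headD []).length : Int) - 1) 1).foldl
    (fun acc i => acc ++ [acc.getLastD 0 + (if PySem.Set.contains hashCols i then 1 else 1000000)]) [0]
  ys.map (fun y => xs.map (fun x => (y, x)))

-- ===== PRECONDITION & SPEC =====
-- Pre_ excludes exactly the inputs on which Python A raises: the empty grid
-- (input[0] → IndexError) and ragged grids where some row is shorter than
-- len(input[0]) - 1 (x[i] → IndexError).
def Pre_calc_coords (input : List (List String)) : Prop :=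
  input ≠ [] ∧ ∀ row ∈ input, (input.headD []).length ≤ row.length + 1
instance (input : List (List String)) : Decidable (Pre_calc_coords input) := by
  unfold Pre_calc_coords; infer_instance
def pvWitness_calc_coords : List (List String) := [[".", "#"], ["#", "."]]

def Spec_calc_coords (input : List (List String)) (out : List (List (Int × Int))) : Prop := out = calc_coords_alt input
instance (input : List (List String)) (out : List (List (Int × Int))) : Decidable (Spec_calc_coords input out) := by unfold Spec_calc_coords; infer_instance

-- ===== CLAIM (what is proved, stated in full; the proofs are below) =====
def Claim_equal_calc_coords : Prop := ∀ (input : List (List String)), Dom_calc_coords input → Pre_calc_coords input → Spec_calc_coords input (calc_coords input)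


-- ===== LEMMAS AND PROOFS =====

-- A's pair-state offset loop (list of offsets, current offset) equals B's
-- append-with-getLastD loop, for any condition c on the elements.
theorem pvLoopShape {beta : Type} (c : beta → Bool) (bs : List beta) (l : List Int) (v : Int)
    (h : l.getLastD 0 = v) :
    (bs.foldl (fun (st : List Int × Int) b =>
        let o := if c b then st.2 + 1 else st.2 + 1000000
        (st.1 ++ [o], o)) (l, v)).1
      = bs.foldl (fun acc b => acc ++ [acc.getLastD 0 + (if c b then 1 else 1000000)]) l := by
  induction bs generalizing l v with
  | nil => rfl
  | cons b bs ih =>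
      simp only [List.foldl_cons]
      rw [h, show (if c b then v + 1 else v + 1000000) = v + (if c b then 1 else 1000000) by
        by_cases hc : c b <;> simp [hc]]
      exact ih _ _ (by simp)

-- the Bool component of B's inner sweep over one row: true iff the row contains '#'
theorem pvInnerSnd (l : List (Int × String)) (s : PySem.Set Int) (b : Bool) :
    (l.foldl (fun p ic => if ic.2 = "#" then (PySem.Set.add p.1 ic.1, true) else p) (s, b)).2
      = (b || l.any (fun ic => ic.2 == "#")) := by
  induction l generalizing s b with
  | nil => simp
  | cons ic l ih =>
      by_cases h : ic.2 = "#"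
      · simp [h, ih]
      · simp [h, ih, beq_eq_false_iff_ne.mpr h]

-- the Set component of B's inner sweep ignores the Bool component
theorem pvInnerFst (l : List (Int × String)) (s : PySem.Set Int) (b : Bool) :
    (l.foldl (fun p ic => if ic.2 = "#" then (PySem.Set.add p.1 ic.1, true) else p) (s, b)).1
      = l.foldl (fun s ic => if ic.2 = "#" then PySem.Set.add s ic.1 else s) s := by
  induction l generalizing s b with
  | nil => rfl
  | cons ic l ih => by_cases h : ic.2 = "#" <;> simp [h, ih]

theorem pvAnyContains (row : List String) : row.any (fun c => c == "#") = row.contains "#" := by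
  induction row with
  | nil => rfl
  | cons c row ih =>
      simp [ih]
      by_cases hc : c = "#"
      · simp [hc]
      · simp [beq_eq_false_iff_ne.mpr hc]
        exact fun h => absurd h.symm hc

-- hash_rows after the sweep is exactly the per-row '#'-membership map
theorem pvSweepSnd (input : List (List String)) (s : PySem.Set Int) (acc : List Bool) :
    (input.foldl (fun st row =>
        let inner : PySem.Set Int × Bool := (PySem.List.enumerate row 0).foldl
          (fun p ic => if ic.2 = "#" then (PySem.Set.add p.1 ic.1, true) else p) (st.1, false)
        (inner.1, st.2 ++ [inner.2])) (s, acc)).2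
      = acc ++ input.map (fun row => row.contains "#") := by
  induction input generalizing s acc with
  | nil => simp
  | cons row input ih =>
      simp only [List.foldl_cons, List.map_cons]
      rw [ih]
      have h2 : ((PySem.List.enumerate row 0).foldl
          (fun p ic => if ic.2 = "#" then (PySem.Set.add p.1 ic.1, true) else p) (s, false)).2
          = row.contains "#" := by
        rw [pvInnerSnd]
        have := PySem.List.map_snd_enumerate row 0
        calc (false || (PySem.List.enumerate row 0).any (fun ic => ic.2 == "#"))
            = ((PySem.List.enumerate row 0).map (·.2)).any (fun c => c == "#") := by
              simp only [Bool.false_or, List.any_map, Function.comp_def]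
          _ = row.contains "#" := by rw [this, pvAnyContains]
      rw [h2]; simp

-- hash_cols after the sweep, as a plain fold of conditional Set.add over the rows
theorem pvSweepFst (input : List (List String)) (s : PySem.Set Int) (acc : List Bool) :
    (input.foldl (fun st row =>
        let inner : PySem.Set Int × Bool := (PySem.List.enumerate row 0).foldl
          (fun p ic => if ic.2 = "#" then (PySem.Set.add p.1 ic.1, true) else p) (st.1, false)
        (inner.1, st.2 ++ [inner.2])) (s, acc)).1
      = input.foldl (fun s row => (PySem.List.enumerate row 0).foldl
          (fun s ic => if ic.2 = "#" then PySem.Set.add s ic.1 else s) s) s := by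
  induction input generalizing s acc with
  | nil => rfl
  | cons row input ih => simp only [List.foldl_cons]; rw [ih, pvInnerFst]

theorem pvMemFoldAdd (l : List (Int × String)) (s : PySem.Set Int) (x : Int) :
    (x ∈ l.foldl (fun s ic => if ic.2 = "#" then PySem.Set.add s ic.1 else s) s)
      ↔ x ∈ s ∨ ∃ ic ∈ l, ic.2 = "#" ∧ ic.1 = x := by
  induction l generalizing s with
  | nil => simp
  | cons ic l ih =>
      by_cases h : ic.2 = "#" <;>
        simp [h, ih, PySem.Set.mem_add] <;> tauto

theorem pvMemCols (input : List (List String)) (s : PySem.Set Int) (x : Int) :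
    (x ∈ input.foldl (fun s row => (PySem.List.enumerate row 0).foldl
        (fun s ic => if ic.2 = "#" then PySem.Set.add s ic.1 else s) s) s)
      ↔ x ∈ s ∨ ∃ row ∈ input, ∃ ic ∈ PySem.List.enumerate row 0, ic.2 = "#" ∧ ic.1 = x := by
  induction input generalizing s with
  | nil => simp
  | cons row input ih => simp [ih, pvMemFoldAdd]; tauto

-- A's column test agrees with B's set-membership test for a nonnegative index
theorem pvColCond (input : List (List String)) (i : Int) (hi : 0 ≤ i) :
    (input.map (fun x => PySem.List.pyGet? x i)).contains (some "#")
      = PySem.Set.contains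
          (input.foldl (fun s row => (PySem.List.enumerate row 0).foldl
            (fun s ic => if ic.2 = "#" then PySem.Set.add s ic.1 else s) s) PySem.Set.empty) i := by
  rw [Bool.eq_iff_iff]
  rw [List.contains_iff_mem, PySem.Set.contains_iff, pvMemCols]
  constructor
  · intro h
    obtain ⟨row, hrow, hsome⟩ := List.mem_map.mp h
    rw [PySem.List.pyGet?_of_nonneg row hi] at hsome
    obtain ⟨hlt, hval⟩ := List.getElem?_eq_some_iff.mp hsome
    refine Or.inr ⟨row, hrow, ((i.toNat : Int), "#"), ?_, rfl, by omega⟩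
    rw [PySem.List.mem_enumerate_iff]
    exact ⟨i.toNat, hlt, by simp [hval]⟩
  · rintro (h | ⟨row, hrow, ic, hic, h2, h1⟩)
    · simp [PySem.Set.empty] at h
    · obtain ⟨k, hk, hic_eq⟩ := (PySem.List.mem_enumerate_iff _ _ _).mp hic
      refine List.mem_map.mpr ⟨row, hrow, ?_⟩
      rw [PySem.List.pyGet?_of_nonneg row hi]
      have hfst : (k : Int) = i := by
        have := congrArg Prod.fst hic_eq; simp at this; omega
      have hki : i.toNat = k := by omega
      have hsnd : row[k] = "#" := by
        have := congrArg Prod.snd hic_eq; simp at this; rw [← this, h2]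
      rw [List.getElem?_eq_some_iff]
      exact ⟨by omega, by simp only [hki]; exact hsnd⟩

theorem calc_coords_spec : Claim_equal_calc_coords := by
  intro input _ _
  show calc_coords input = calc_coords_alt input
  simp only [calc_coords, calc_coords_alt]
  rw [pvLoopShape (fun row => row.contains "#") input.dropLast [0] 0 rfl]
  rw [pvSweepSnd, pvSweepFst]
  rw [pvLoopShape (fun i => (input.map (fun x => PySem.List.pyGet? x i)).contains (some "#"))
        _ [0] 0 rfl]
  rw [List.nil_append, ← List.map_dropLast, List.foldl_map]
  rw [PySem.List.foldl_congr_mem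
        (PySem.List.pyRange 0 (((input.headD []).length : Int) - 1) 1) _
        (fun (acc : List Int) i =>
          acc ++ [acc.getLastD 0 + (if PySem.Set.contains
            (input.foldl (fun s row => (PySem.List.enumerate row 0).foldl
              (fun s ic => if ic.2 = "#" then PySem.Set.add s ic.1 else s) s) PySem.Set.empty) i
            then 1 else 1000000)])
        [0]
        (fun acc i hi => by
          rw [pvColCond input i ((PySem.List.mem_pyRange_one.mp hi).1)])]
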